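-- pv_equiv track=rewrite | github.com/Moriahise/taamimflow_project | taamimflow/core/cantillation.py | _detect_context_flags
-- ===== SOURCE A (Python) =====
-- from typing import Dict, Iterable, List, Optional, Tuple, Union
--
-- def _detect_context_flags(lines: List[str]) -> Tuple[List[bool], List[bool], List[bool], List[bool]]:
--     """Detektiere Kapitel‑/Alijah‑Grenzen basierend auf Zeilenumbrüchen.
--
--     Wir betrachten die Eingabe als Sequenz von Zeilen. Ein Kapitel‑ oder
--     Alijah‑Ende wird angenommen, wenn eine leere Zeile oder eine Zeile
--     mit nur Leerzeichen folgt. Der Beginn eines neuen Kapitels/Alijahs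
--     wird dann beim nächsten Token gesetzt. Diese heuristische Erkennung
--     kann durch externe Metadaten ersetzt werden.
--
--     :param lines: Liste von Strings (Tokens), wie von ``segment_text``
--     :return: Vier Listen gleicher Länge: chapter_start, chapter_end,
--              aliyah_start, aliyah_end. Alle Werte sind bools.
--     """
--     n = len(lines)
--     chap_start = [False] * n
--     chap_end = [False] * n
--     ali_start = [False] * n
--     ali_end = [False] * n
--     if n == 0:
--         return chap_start, chap_end, ali_start, ali_end
--     # Wir interpretieren doppelte Leerzeichen ("" Einträge) als Abschnittsmarker
--     prev_blank = True
--     for i, tok in enumerate(lines):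
--         blank = not tok.strip()
--         if prev_blank and not blank:
--             # Abschnitt beginnt
--             chap_start[i] = True
--             ali_start[i] = True
--         if blank and not prev_blank:
--             # Abschnitt endet
--             chap_end[i - 1] = True
--             ali_end[i - 1] = True
--         prev_blank = blank
--     # Letztes Token beenden, falls kein abschließender Blank folgt
--     if not prev_blank:
--         chap_end[-1] = True
--         ali_end[-1] = True
--     return chap_start, chap_end, ali_start, ali_end
-- ===== SOURCE B (Python) =====
-- def _detect_context_flags(lines):
--     n = len(lines)
--     blank = [not t.strip() for t in lines]
--     chap_start = [not blank[i] and (i == 0 or blank[i - 1]) for i in range(n)]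
--     chap_end = [not blank[i] and (i == n - 1 or blank[i + 1]) for i in range(n)]
--     return chap_start, chap_end, list(chap_start), list(chap_end)
-- ===== Notes on version B (the rewrite author's own statement) =====
-- stated objective: simpler
-- what changed: Replaces the prev_blank state machine with in-place flag setting by a precomputed blank mask and stateless neighbor lookups: start iff non-blank with blank/edge on the left, end iff non-blank with blank/edge on the right.
import Mathlib
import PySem

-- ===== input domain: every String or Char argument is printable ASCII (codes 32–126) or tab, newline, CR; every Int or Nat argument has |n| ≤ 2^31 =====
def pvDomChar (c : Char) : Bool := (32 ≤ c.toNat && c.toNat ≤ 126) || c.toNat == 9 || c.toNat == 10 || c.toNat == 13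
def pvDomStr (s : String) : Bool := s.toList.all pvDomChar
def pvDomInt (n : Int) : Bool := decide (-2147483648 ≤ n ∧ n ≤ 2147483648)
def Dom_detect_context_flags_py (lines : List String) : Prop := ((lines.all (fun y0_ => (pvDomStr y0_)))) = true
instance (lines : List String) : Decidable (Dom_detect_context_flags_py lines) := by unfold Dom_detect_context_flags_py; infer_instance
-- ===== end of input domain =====

-- B replaces A's prev_blank state machine (in-place flag stores) with a precomputed blank mask
-- and stateless neighbor lookups; objective: simpler.

-- ===== PORT A =====
-- one loop-body step of A's for-loop; state = (chap_start, chap_end, ali_start, ali_end, prev_blank)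
def pvAStep (st : List Bool × List Bool × List Bool × List Bool × Bool) (p : Int × String) :
    List Bool × List Bool × List Bool × List Bool × Bool :=
  let (cs, ce, as_, ae, prev) := st
  let blank := PySem.Str.strip p.2 == ""
  -- Python 'chap_start[i] = True': i from enumerate is ≥ 0, so .toNat is exact
  let cs := if prev && !blank then cs.set p.1.toNat true else cs
  let as_ := if prev && !blank then as_.set p.1.toNat true else as_
  -- Python 'chap_end[i-1] = True': the branch requires ¬prev, impossible at i = 0 (prev starts
  -- True), so i ≥ 1 there and (i-1).toNat is exact (Python's negative index is never reached)
  let ce := if blank && !prev then ce.set (p.1 - 1).toNat true else ce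
  let ae := if blank && !prev then ae.set (p.1 - 1).toNat true else ae
  (cs, ce, as_, ae, blank)

def detect_context_flags_py (lines : List String) : List Bool × List Bool × List Bool × List Bool :=
  let n := lines.length
  let chap_start := List.replicate n false
  let chap_end := List.replicate n false
  let ali_start := List.replicate n false
  let ali_end := List.replicate n false
  if n = 0 then (chap_start, chap_end, ali_start, ali_end)
  else
    let st := (PySem.List.enumerate lines 0).foldl pvAStep
      (chap_start, chap_end, ali_start, ali_end, true)
    -- Python 'chap_end[-1] = True': the last index, n ≥ 1 here
    let ce := if !st.2.2.2.2 then st.2.1.set (n - 1) true else st.2.1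
    let ae := if !st.2.2.2.2 then st.2.2.2.1.set (n - 1) true else st.2.2.2.1
    (st.1, ce, st.2.2.1, ae)

-- ===== PORT B =====
def detect_context_flags_py_alt (lines : List String) : List Bool × List Bool × List Bool × List Bool :=
  let n := lines.length
  let blank := lines.map (fun t => PySem.Str.strip t == "")
  -- 'blank[i-1]' / 'blank[i+1]' are guarded by the short-circuit, so the default is never read
  let chap_start := (List.range n).map
    (fun i => !(blank.getD i true) && (decide (i = 0) || blank.getD (i - 1) true))
  let chap_end := (List.range n).map
    (fun i => !(blank.getD i true) && (decide (i = n - 1) || blank.getD (i + 1) true))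
  (chap_start, chap_end, chap_start, chap_end)

-- ===== PRECONDITION & SPEC =====
def Spec_detect_context_flags_py (lines : List String) (out : List Bool × List Bool × List Bool × List Bool) : Prop := out = detect_context_flags_py_alt lines
instance (lines : List String) (out : List Bool × List Bool × List Bool × List Bool) : Decidable (Spec_detect_context_flags_py lines out) := by unfold Spec_detect_context_flags_py; infer_instance

-- ===== CLAIM (what is proved, stated in full; the proofs are below) =====
def Claim_equal_detect_context_flags_py : Prop := ∀ (lines : List String), Dom_detect_context_flags_py lines → Spec_detect_context_flags_py lines (detect_context_flags_py lines)

-- ===== LEMMAS AND PROOFS =====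

-- blank mask and B's two neighbor conditions, as named functions
def pvBl (lines : List String) : List Bool := lines.map (fun t => PySem.Str.strip t == "")

def pvS (bl : List Bool) (j : Nat) : Bool :=
  !(bl.getD j true) && (decide (j = 0) || bl.getD (j - 1) true)

-- the end-condition as seen by A's loop at step i (which sets index i-1)
def pvE' (bl : List Bool) (i : Nat) : Bool :=
  bl.getD i true && !(bl.getD (i - 1) true)

-- A's loop state after its first k iterations
def pvStateAt (bl : List Bool) (k : Nat) :
    List Bool × List Bool × List Bool × List Bool × Bool :=
  let n := bl.length
  let cs := (List.range n).map (fun j => decide (j < k) && pvS bl j)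
  let ce := (List.range n).map (fun j => decide (j < k - 1) && pvE' bl (j + 1))
  (cs, ce, cs, ce, if k = 0 then true else bl.getD (k - 1) true)

lemma pv_decide_lt (j k : Nat) (hne : j ≠ k) : decide (j < k) = decide (j < k + 1) := by
  rcases Nat.lt_trichotomy j k with h | h | h
  · simp [h, Nat.lt_succ_of_lt h]
  · exact absurd h hne
  · have h1 : ¬ j < k := by omega
    have h2 : ¬ j < k + 1 := by omega
    simp [h1, h2]

lemma pv_upd (n k : Nat) (f : Nat → Bool) (hk : k < n) :
    (if f k then ((List.range n).map (fun j => decide (j < k) && f j)).set k true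
     else (List.range n).map (fun j => decide (j < k) && f j))
    = (List.range n).map (fun j => decide (j < k + 1) && f j) := by
  split_ifs with h
  · apply List.ext_getElem
    · simp
    · intro j hj hj'
      have hjn : j < n := by simpa using hj'
      rw [List.getElem_set]
      rcases eq_or_ne k j with rfl | hne
      · simp [h]
      · have := pv_decide_lt j k (Ne.symm hne)
        simp [hne, this]
  · apply List.map_congr_left
    intro j _
    rcases eq_or_ne j k with rfl | hne
    · simp [h]
    · rw [pv_decide_lt j k hne]

lemma pv_step (lines : List String) (k : Nat) (hk : k < lines.length) :
    pvAStep (pvStateAt (pvBl lines) k) (((0 : Int) + k), lines[k]) =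
      pvStateAt (pvBl lines) (k + 1) := by
  set bl := pvBl lines with hbl
  have hblank : (PySem.Str.strip lines[k] == "") = bl.getD k true := by
    simp [hbl, pvBl, List.getD, hk]
  have hcond1 : ((if k = 0 then true else bl.getD (k - 1) true) && !(bl.getD k true)) = pvS bl k := by
    rcases k with _ | m <;> simp [pvS, Bool.and_comm]
  have hcond2 : (bl.getD k true && !(if k = 0 then true else bl.getD (k - 1) true)) = pvE' bl k := by
    rcases k with _ | m <;> simp [pvE']
  have h1 : ((0 : Int) + (k : Int)).toNat = k := by simp
  have h2 : ((0 : Int) + (k : Int) - 1).toNat = k - 1 := by omega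
  have hk1 : k + 1 - 1 = k := by omega
  simp only [pvAStep, pvStateAt]
  rw [hblank, hcond1, hcond2, h1, h2, hk1]
  have hkn : k < bl.length := by simp [hbl, pvBl]; omega
  have hcs := pv_upd bl.length k (pvS bl) hkn
  have hce : (if pvE' bl k = true
      then ((List.range bl.length).map (fun j => decide (j < k - 1) && pvE' bl (j + 1))).set (k - 1) true
      else (List.range bl.length).map (fun j => decide (j < k - 1) && pvE' bl (j + 1)))
      = (List.range bl.length).map (fun j => decide (j < k) && pvE' bl (j + 1)) := by
    rcases k with _ | m
    · have : pvE' bl 0 = false := by simp [pvE']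
      rw [this]
      simp
    · have hmn : m < bl.length := by omega
      have := pv_upd bl.length m (fun j => pvE' bl (j + 1)) hmn
      simpa using this
  rw [hcs, hce]
  simp

lemma pv_fold_inv (lines : List String) (k : Nat) (hk : k ≤ lines.length) :
    ((PySem.List.enumerate lines 0).take k).foldl pvAStep
      (List.replicate lines.length false, List.replicate lines.length false,
       List.replicate lines.length false, List.replicate lines.length false, true)
    = pvStateAt (pvBl lines) k := by
  induction k with
  | zero =>
      simp [pvStateAt, pvBl, List.map_const']
  | succ k ih =>
      have hk' : k < lines.length := by omega
      have hlen : k < (PySem.List.enumerate lines 0).length := by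
        simpa [PySem.List.length_enumerate] using hk'
      rw [List.take_add_one, List.getElem?_eq_getElem hlen, List.foldl_append,
          ih (by omega)]
      simp only [Option.toList_some, List.foldl_cons, List.foldl_nil]
      rw [PySem.List.getElem_enumerate]
      exact pv_step lines k hk'

lemma pv_end_fix (bl : List Bool) (_hn : bl.length ≠ 0) :
    (if !(bl.getD (bl.length - 1) true)
     then ((List.range bl.length).map (fun j => decide (j < bl.length - 1) && pvE' bl (j + 1))).set (bl.length - 1) true
     else (List.range bl.length).map (fun j => decide (j < bl.length - 1) && pvE' bl (j + 1)))
    = (List.range bl.length).map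
        (fun j => !(bl.getD j true) && (decide (j = bl.length - 1) || bl.getD (j + 1) true)) := by
  set n := bl.length with hnn
  split_ifs with h
  · apply List.ext_getElem
    · simp
    · intro j hj hj'
      have hjn : j < n := by simpa using hj'
      rw [List.getElem_set]
      rcases eq_or_ne (n - 1) j with rfl | hne
      · simp only [List.getElem_map, List.getElem_range]
        simp only [Bool.not_eq_eq_eq_not, Bool.not_true] at h
        simpa [List.getD] using h
      · have hjlt : j < n - 1 := by omega
        simp [hne, hjlt, pvE', Bool.and_comm, hne.symm]
  · apply List.map_congr_left
    intro j hj
    have hjn : j < n := by simpa using hj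
    rcases eq_or_ne j (n - 1) with rfl | hne
    · simp only [Bool.not_eq_eq_eq_not] at h
      simpa [List.getD] using h
    · have hjlt : j < n - 1 := by omega
      simp [hjlt, hne, pvE', Bool.and_comm]

lemma pv_A_eq (lines : List String) :
    detect_context_flags_py lines = detect_context_flags_py_alt lines := by
  rcases eq_or_ne lines.length 0 with h0 | h0
  · rcases List.length_eq_zero_iff.mp h0 with rfl
    rfl
  · have hfold :
        (PySem.List.enumerate lines 0).foldl pvAStep
          (List.replicate lines.length false, List.replicate lines.length false,
           List.replicate lines.length false, List.replicate lines.length false, true)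
        = pvStateAt (pvBl lines) lines.length := by
      have := pv_fold_inv lines lines.length le_rfl
      rwa [List.take_of_length_le (by simp [PySem.List.length_enumerate])] at this
    have hbln : (pvBl lines).length = lines.length := by simp [pvBl]
    have hcs : (List.range lines.length).map (fun j => decide (j < lines.length) && pvS (pvBl lines) j)
        = (List.range lines.length).map (pvS (pvBl lines)) := by
      apply List.map_congr_left
      intro j hj
      have : j < lines.length := by simpa using hj
      simp [this]
    have hend := pv_end_fix (pvBl lines) (by omega)
    simp only [detect_context_flags_py, detect_context_flags_py_alt, if_neg h0]
    rw [hfold]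
    simp only [pvStateAt, hbln]
    rw [hcs]
    have hprev : (if lines.length = 0 then true else (pvBl lines).getD (lines.length - 1) true)
        = (pvBl lines).getD (lines.length - 1) true := by simp [h0]
    rw [hprev]
    rw [hbln] at hend
    rw [hend]
    rfl

-- ===== VERDICT (by name: the statement is the Claim_ definition above) =====
theorem detect_context_flags_py_spec : Claim_equal_detect_context_flags_py := by
  intro lines _
  exact pv_A_eq lines
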